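-- pv_equiv track=rewrite | github.com/SashoStoichkovArchive/HB_TASKS | projects/week02/04_03_2019/week2_solutions.py | gas_stations
-- ===== SOURCE A (Python) =====
-- def gas_stations(distance, tank_size, stations):
--     gas_stations_in_route = []
--     distance_traveled = 0
--
--     while distance_traveled + tank_size < distance:
--         gas_station = max([station for station in stations if station <= distance_traveled + tank_size])
--
--         gas_stations_in_route.append(gas_station)
--
--         distance_traveled = gas_station
--
--     return gas_stations_in_route
-- ===== SOURCE B (Python) =====
-- def gas_stations(distance, tank_size, stations):
--     s = sorted(stations)
--     n = len(s)
--     route = []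
--     pos = 0
--     i = 0
--     while pos + tank_size < distance:
--         best = None
--         while i < n and s[i] <= pos + tank_size:
--             best = s[i]
--             i += 1
--         route.append(best)
--         pos = best
--     return route
-- ===== Notes on version B (the rewrite author's own statement) =====
-- stated objective: alternative
-- what changed: A rescans all stations with filter+max on every greedy step; B sorts the stations once and advances a single never-resetting pointer over the sorted list, so each station is examined once after the sort.
import Mathlib
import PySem

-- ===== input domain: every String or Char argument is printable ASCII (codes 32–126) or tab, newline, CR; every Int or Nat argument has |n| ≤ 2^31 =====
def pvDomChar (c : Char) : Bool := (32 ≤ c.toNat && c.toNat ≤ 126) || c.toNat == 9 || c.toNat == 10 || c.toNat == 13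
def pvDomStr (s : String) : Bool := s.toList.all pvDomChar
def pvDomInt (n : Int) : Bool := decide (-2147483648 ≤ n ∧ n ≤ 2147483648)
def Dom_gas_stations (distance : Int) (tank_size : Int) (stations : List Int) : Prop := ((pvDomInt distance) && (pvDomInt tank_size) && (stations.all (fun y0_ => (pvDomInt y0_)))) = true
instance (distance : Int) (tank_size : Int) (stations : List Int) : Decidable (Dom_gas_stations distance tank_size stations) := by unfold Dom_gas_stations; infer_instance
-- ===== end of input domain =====

-- B sorts the stations once and advances one pointer instead of re-scanning all stations each greedy step.
-- Equivalence is about the RETURN value; neither program mutates its arguments.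

-- ===== PORT A =====
-- the while loop, with fuel stations.length + 1 (inside Pre_ each pick is a distinct station
-- value strictly above the previous position, so the loop body runs at most stations.length times)
def gasGoA (distance tank : Int) (stations : List Int) : Nat → Int → List Int → List Int
  | 0, _, acc => acc
  | fuel + 1, dt, acc =>
    if dt + tank < distance then
      match PySem.List.max? (stations.filter (fun s => decide (s ≤ dt + tank))) (fun x => x) with
      | none => acc          -- Python: max() of empty sequence raises ValueError (outside Pre_)
      | some g => gasGoA distance tank stations fuel g (acc ++ [g])
    else acc

def gas_stations (distance : Int) (tank_size : Int) (stations : List Int) : List Int :=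
  gasGoA distance tank_size stations (stations.length + 1) 0 []

-- ===== PORT B =====
-- inner while: advance i while s[i] <= limit, remembering the last element seen
def bScan (s : List Int) (limit : Int) (i : Nat) (best : Option Int) : Option Int × Nat :=
  if h : i < s.length then
    if s.getD i 0 ≤ limit then bScan s limit (i + 1) (some (s.getD i 0)) else (best, i)
  else (best, i)
termination_by s.length - i

-- outer while (same fuel shape as A's loop; best = none means Python's TypeError, outside Pre_)
def gasGoB (distance tank : Int) (s : List Int) : Nat → Nat → Int → List Int → List Int
  | 0, _, _, acc => acc
  | fuel + 1, i, pos, acc =>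
    if pos + tank < distance then
      match bScan s (pos + tank) i none with
      | (some b, j) => gasGoB distance tank s fuel j b (acc ++ [b])
      | (none, _) => acc
    else acc

def gas_stations_alt (distance : Int) (tank_size : Int) (stations : List Int) : List Int :=
  gasGoB distance tank_size (PySem.List.sorted stations (fun x => x) false)
    (stations.length + 1) 0 0 []

-- ===== PRECONDITION & SPEC =====
-- Pre_ is exactly the set of inputs on which A returns: from every reached position p (0 or a
-- nonnegative station) that is still too far from the goal, some station lies strictly ahead
-- within tank range; otherwise A raises ValueError (no reachable station) or loops forever
-- (the farthest reachable station is the current position).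
def Pre_gas_stations (distance : Int) (tank_size : Int) (stations : List Int) : Prop :=
  ∀ p ∈ (0 : Int) :: stations, 0 ≤ p → p + tank_size < distance →
    ∃ s ∈ stations, p < s ∧ s ≤ p + tank_size

instance (distance : Int) (tank_size : Int) (stations : List Int) : Decidable (Pre_gas_stations distance tank_size stations) := by unfold Pre_gas_stations; infer_instance

def pvWitness_gas_stations : Int × Int × List Int := (10, 4, [3, 6])

def Spec_gas_stations (distance : Int) (tank_size : Int) (stations : List Int) (out : List Int) : Prop := out = gas_stations_alt distance tank_size stations
instance (distance : Int) (tank_size : Int) (stations : List Int) (out : List Int) : Decidable (Spec_gas_stations distance tank_size stations out) := by unfold Spec_gas_stations; infer_instance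

-- ===== CLAIM (what is proved, stated in full; the proofs are below) =====
def Claim_equal_gas_stations : Prop := ∀ (distance : Int) (tank_size : Int) (stations : List Int), Dom_gas_stations distance tank_size stations → Pre_gas_stations distance tank_size stations → Spec_gas_stations distance tank_size stations (gas_stations distance tank_size stations)

-- ===== LEMMAS AND PROOFS =====

-- the inner pointer scan returns the end j of the reachable prefix and (unless it did not move)
-- the element just before j
theorem bScan_spec (s : List Int) (limit : Int) (i : Nat) (best : Option Int) :
    i ≤ s.length →
      i ≤ (bScan s limit i best).2 ∧ (bScan s limit i best).2 ≤ s.length ∧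
      (∀ k, i ≤ k → k < (bScan s limit i best).2 → s.getD k 0 ≤ limit) ∧
      ((bScan s limit i best).2 < s.length → ¬ s.getD ((bScan s limit i best).2) 0 ≤ limit) ∧
      (bScan s limit i best).1 = (if (bScan s limit i best).2 = i then best
        else some (s.getD ((bScan s limit i best).2 - 1) 0)) := by
  fun_induction bScan s limit i best with
  | case1 i best hlt hle ih =>
    intro _
    obtain ⟨ih1, ih2, ih3, ih4, ih5⟩ := ih (by omega)
    refine ⟨by omega, ih2, ?_, ih4, ?_⟩
    · intro k hk1 hk2
      rcases Nat.eq_or_lt_of_le hk1 with h | h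
      · subst h; exact hle
      · exact ih3 k h hk2
    · rw [ih5]
      by_cases hji : (bScan s limit (i + 1) (some (s.getD i 0))).2 = i + 1
      · rw [if_pos hji, if_neg (by omega), hji]
        simp
      · rw [if_neg hji, if_neg (by omega)]
  | case2 i best hlt hle =>
    intro hi
    exact ⟨le_rfl, by omega, by omega, fun _ => hle, by simp⟩
  | case3 i best hlt =>
    intro hi
    exact ⟨le_rfl, hi, by omega, by omega, by simp⟩

-- sorted-list helpers, in getD form
theorem sortedS_mono (st : List Int) {k l : Nat} (hkl : k ≤ l)
    (hl : l < (PySem.List.sorted st (fun x => x) false).length) :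
    (PySem.List.sorted st (fun x => x) false).getD k 0 ≤
      (PySem.List.sorted st (fun x => x) false).getD l 0 := by
  rw [List.getD_eq_getElem _ _ (lt_of_le_of_lt hkl hl), List.getD_eq_getElem _ _ hl]
  exact PySem.List.sorted_id_getElem_mono st hkl hl

theorem sortedS_mem (st : List Int) {k : Nat}
    (hk : k < (PySem.List.sorted st (fun x => x) false).length) :
    (PySem.List.sorted st (fun x => x) false).getD k 0 ∈ st := by
  rw [List.getD_eq_getElem _ _ hk]
  exact (PySem.List.mem_sorted st (fun x => x) false _).mp (List.getElem_mem hk)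

theorem sortedS_idx (st : List Int) {w : Int} (hw : w ∈ st) :
    ∃ k, ∃ _ : k < (PySem.List.sorted st (fun x => x) false).length,
      (PySem.List.sorted st (fun x => x) false).getD k 0 = w := by
  obtain ⟨k, hk, hke⟩ := List.mem_iff_getElem.mp
    ((PySem.List.mem_sorted st (fun x => x) false w).mpr hw)
  exact ⟨k, hk, by rw [List.getD_eq_getElem _ _ hk]; exact hke⟩

-- the two loops run in lockstep: at position dt with pointer i past exactly the stations ≤ dt,
-- both pick the maximum station within range and advance to it
theorem lockstep (d t : Int) (st : List Int) (hpre : Pre_gas_stations d t st) :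
    ∀ (fuel : Nat) (dt : Int) (i : Nat) (acc : List Int),
      dt ∈ (0 : Int) :: st → 0 ≤ dt →
      i ≤ (PySem.List.sorted st (fun x => x) false).length →
      (∀ k, k < i → (PySem.List.sorted st (fun x => x) false).getD k 0 ≤ dt) →
      gasGoA d t st fuel dt acc =
        gasGoB d t (PySem.List.sorted st (fun x => x) false) fuel i dt acc := by
  intro fuel
  induction fuel with
  | zero => intro dt i acc _ _ _ _; rfl
  | succ fuel ih =>
    intro dt i acc hdt hdt0 hi hbelow
    by_cases h : dt + t < d
    · obtain ⟨w, hw_mem, hw_gt, hw_le⟩ := hpre dt hdt hdt0 h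
      obtain ⟨kw, hkw_lt, hkw_eq⟩ := sortedS_idx st hw_mem
      have hkw_ge : i ≤ kw := by
        by_contra hc
        have := hbelow kw (by omega)
        rw [hkw_eq] at this; omega
      rcases hbs : bScan (PySem.List.sorted st (fun x => x) false) (dt + t) i none with ⟨b, j⟩
      have specs := bScan_spec (PySem.List.sorted st (fun x => x) false) (dt + t) i none hi
      rw [hbs] at specs
      obtain ⟨h1, h2, h3, h4, h5⟩ := specs
      dsimp only at h1 h2 h3 h4 h5
      have hkwj : kw < j := by
        by_contra hc
        have hjlt : j < (PySem.List.sorted st (fun x => x) false).length := by omega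
        exact (h4 hjlt) (le_trans (by
          calc (PySem.List.sorted st (fun x => x) false).getD j 0
              ≤ (PySem.List.sorted st (fun x => x) false).getD kw 0 :=
                sortedS_mono st (by omega) hkw_lt
            _ = w := hkw_eq) hw_le)
      have hij : i < j := by omega
      have hj1 : j - 1 < (PySem.List.sorted st (fun x => x) false).length := by omega
      set g := (PySem.List.sorted st (fun x => x) false).getD (j - 1) 0 with hg
      have hb : b = some g := by rw [h5, if_neg (by omega)]
      have hg_mem : g ∈ st := sortedS_mem st hj1
      have hg_le : g ≤ dt + t := h3 (j - 1) (by omega) (by omega)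
      have hg_gt : dt < g := by
        have : w ≤ g := by rw [← hkw_eq]; exact sortedS_mono st (by omega) hj1
        omega
      have hg_filter : g ∈ st.filter (fun s => decide (s ≤ dt + t)) := by
        rw [List.mem_filter]; exact ⟨hg_mem, by simpa using hg_le⟩
      rcases hM : PySem.List.max? (st.filter (fun s => decide (s ≤ dt + t))) (fun x => x)
        with _ | M
      · rw [(PySem.List.max?_eq_none_iff _ _).mp hM] at hg_filter
        exact absurd hg_filter (List.not_mem_nil)
      · have hM_mem := PySem.List.max?_mem hM
        rw [List.mem_filter] at hM_mem
        obtain ⟨hM_st, hM_le⟩ := hM_mem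
        have hM_le : M ≤ dt + t := by simpa using hM_le
        have hgM : g ≤ M := PySem.List.max?_isMax hM g hg_filter
        have hMg : M ≤ g := by
          obtain ⟨kM, hkM_lt, hkM_eq⟩ := sortedS_idx st hM_st
          have hkMj : kM < j := by
            by_contra hc
            have hjlt : j < (PySem.List.sorted st (fun x => x) false).length := by omega
            refine (h4 hjlt) (le_trans ?_ hM_le)
            calc (PySem.List.sorted st (fun x => x) false).getD j 0
                ≤ (PySem.List.sorted st (fun x => x) false).getD kM 0 :=
                  sortedS_mono st (by omega) hkM_lt
              _ = M := hkM_eq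
          rw [← hkM_eq]
          exact sortedS_mono st (by omega) hj1
        have hMeq : M = g := le_antisymm hMg hgM
        simp only [gasGoA, gasGoB, if_pos h, hM, hbs, hb, hMeq]
        exact ih g j (acc ++ [g]) (List.mem_cons_of_mem _ hg_mem) (by omega) h2
          (fun k hk => le_trans (sortedS_mono st (by omega) hj1) le_rfl)
    · simp only [gasGoA, gasGoB, if_neg h]

-- ===== VERDICT (by name: the statement is the Claim_ definition above) =====
theorem gas_stations_spec : Claim_equal_gas_stations := by
  intro d t st _ hpre
  unfold Spec_gas_stations gas_stations gas_stations_alt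
  exact lockstep d t st hpre (st.length + 1) 0 0 [] (List.mem_cons_self) le_rfl
    (Nat.zero_le _) (fun k hk => absurd hk (Nat.not_lt_zero k))
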